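-- pv_equiv track=rewrite | github.com/pvdwijdeven/AutoML | automl/eda/overview.py | join_feature_links_with_linebreaks
-- ===== SOURCE A (Python) =====
-- def join_feature_links_with_linebreaks(
--     feature_links: list[str], max_line_length: int = 90
-- ) -> str:
--     lines = []
--     current_line = ""
--     current_len = 0
--
--     for html_link in feature_links:
--         # Extract visible text from the HTML link
--         # Assumes format: <a ...>VISIBLE TEXT</a>
--         visible_text = html_link.split(">")[-2].split("<")[0]
--         part_len = len(visible_text) + (
--             2 if current_line else 0
--         )  # +2 for ", " if needed
--
--         if current_len + part_len > max_line_length: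
--             lines.append(current_line)
--             current_line = html_link
--             current_len = len(visible_text)
--         else:
--             if current_line:
--                 current_line += ", " + html_link
--                 current_len += part_len
--             else:
--                 current_line = html_link
--                 current_len = len(visible_text)
--
--     if current_line:
--         lines.append(current_line)
--
--     return "<br>".join(lines)
-- ===== SOURCE B (Python) =====
-- def join_feature_links_with_linebreaks(feature_links, max_line_length=90):
--     def vis_len(link):
--         return len(link.split(">")[-2].split("<")[0])
--
--     def take_line(links):
--         # maximal prefix fitting on one line; the line's first link is taken unconditionally
--         cur = vis_len(links[0])
--         i = 1
--         while i < len(links) and cur + 2 + vis_len(links[i]) <= max_line_length: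
--             cur += 2 + vis_len(links[i])
--             i += 1
--         return ", ".join(links[:i]), links[i:]
--
--     lines = []
--     links = feature_links
--     while links:
--         line, links = take_line(links)
--         lines.append(line)
--     return "<br>".join(lines)
-- ===== Notes on version B (the rewrite author's own statement) =====
-- stated objective: alternative
-- what changed: A runs one interleaved loop with cross-line running state (current line string, running length, flush-on-overflow); B has no cross-line state: it repeatedly calls a take_line helper that splits off the maximal fitting prefix of the remaining links as one line, then joins.
-- intended difference: When the list is non-empty and the first link's visible text is longer than max_line_length, A flushes its initial empty current line and returns '<br>' + B's value (a spurious leading blank line); B starts each line with a link unconditionally, which is the intended wrapping. — e.g. on join_feature_links_with_linebreaks(["<a>abcdef</a>"], 3): A returns "<br><a>abcdef</a>", B returns "<a>abcdef</a>"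
import Mathlib
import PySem

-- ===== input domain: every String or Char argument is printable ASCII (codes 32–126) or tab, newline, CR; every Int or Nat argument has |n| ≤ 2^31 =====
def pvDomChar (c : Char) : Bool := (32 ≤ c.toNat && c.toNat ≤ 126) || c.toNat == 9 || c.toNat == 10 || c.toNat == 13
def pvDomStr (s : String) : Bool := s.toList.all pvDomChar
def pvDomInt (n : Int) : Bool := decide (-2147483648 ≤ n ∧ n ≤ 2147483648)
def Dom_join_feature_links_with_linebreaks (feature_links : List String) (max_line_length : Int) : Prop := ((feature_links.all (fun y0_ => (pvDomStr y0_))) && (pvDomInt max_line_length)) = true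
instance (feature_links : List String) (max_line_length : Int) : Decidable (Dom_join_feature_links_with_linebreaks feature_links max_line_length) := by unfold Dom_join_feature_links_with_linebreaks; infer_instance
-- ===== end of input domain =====

-- B replaces A's single loop with cross-line running state (current line string + flush-on-overflow)
-- by repeated maximal-prefix line splitting with no state across lines; on the corner where the first
-- link's visible text is oversized, B drops A's spurious leading blank line (see D_ below).

-- ===== PORT A =====
-- visible_text = html_link.split(">")[-2].split("<")[0]; pyGet? (-2) is none exactly where Python raises IndexError (excluded by Pre_)
def pvVisA (s : List Char) : List Char :=
  match PySem.List.pyGet? (PySem.Chars.splitOn s ['>']) (-2) with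
  | some t => (PySem.Chars.splitOn t ['<']).headD []
  | none => []

def pvALoop (maxL : Int) (links : List (List Char)) (lines : List (List Char))
    (curLine : List Char) (curLen : Int) : List (List Char) :=
  match links with
  | [] => if curLine ≠ [] then lines ++ [curLine] else lines
  | l :: rest =>
    let vt := pvVisA l
    let partLen : Int := (vt.length : Int) + (if curLine ≠ [] then 2 else 0)
    if curLen + partLen > maxL then
      pvALoop maxL rest (lines ++ [curLine]) l (vt.length : Int)
    else if curLine ≠ [] then
      pvALoop maxL rest lines (curLine ++ [',', ' '] ++ l) (curLen + partLen)
    else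
      pvALoop maxL rest lines l (vt.length : Int)

def join_feature_links_with_linebreaks (feature_links : List String) (max_line_length : Int) : String :=
  String.ofList (PySem.Chars.join ['<', 'b', 'r', '>']
    (pvALoop max_line_length (feature_links.map String.toList) [] [] 0))

-- ===== PORT B =====
-- vis_len(link) of Source B; getD [] is unreachable under Pre_
def pvVisLen (s : List Char) : Int :=
  PySem.Chars.len ((PySem.Chars.splitOn
    ((PySem.List.pyGet? (PySem.Chars.splitOn s ['>']) (-2)).getD []) ['<']).headD [])

-- the while-loop inside take_line: extend the line while the next link fits; returns (taken, rest)
def pvTakeRest (maxL : Int) (cur : Int) (rest : List (List Char)) :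
    List (List Char) × List (List Char) :=
  match rest with
  | [] => ([], [])
  | l :: rs =>
    if cur + 2 + pvVisLen l ≤ maxL then
      let p := pvTakeRest maxL (cur + 2 + pvVisLen l) rs
      (l :: p.1, p.2)
    else ([], rest)

-- Source B's outer while-loop: split off one line at a time (take_line inlined: first link unconditional).
-- fuel = number of remaining links, a totality guard only: each pass consumes at least one
-- link, so the 0-fuel branch is never reached when fuel starts at links.length.
def pvWrapLoopF (fuel : Nat) (maxL : Int) (links : List (List Char)) (lines : List (List Char)) :
    List (List Char) :=
  match fuel, links with
  | _, [] => lines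
  | 0, _ => lines
  | fuel + 1, l :: rest =>
    let p := pvTakeRest maxL (pvVisLen l) rest
    pvWrapLoopF fuel maxL p.2 (lines ++ [PySem.Chars.join [',', ' '] (l :: p.1)])

def join_feature_links_with_linebreaks_alt (feature_links : List String) (max_line_length : Int) : String :=
  String.ofList (PySem.Chars.join ['<', 'b', 'r', '>']
    (pvWrapLoopF feature_links.length max_line_length (feature_links.map String.toList) []))

-- ===== PRECONDITION & SPEC =====
-- Pre_ excludes exactly the inputs where A (and Source B alike) raises IndexError: a link with no ">" makes split(">")[-2] fail.
def Pre_join_feature_links_with_linebreaks (feature_links : List String) (_max_line_length : Int) : Prop :=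
  ∀ s ∈ feature_links, PySem.Str.isIn ">" s = true
instance (feature_links : List String) (max_line_length : Int) : Decidable (Pre_join_feature_links_with_linebreaks feature_links max_line_length) := by unfold Pre_join_feature_links_with_linebreaks; infer_instance

def pvWitness_join_feature_links_with_linebreaks : List String × Int :=
  (["<a href=\"#x\">alpha</a>", "<a href=\"#y\">beta</a>", "<a href=\"#z\">gamma</a>"], 10)

-- D_-only helper, a shape property of the input stated with the standard library only:
-- the length of the run of non-'<' characters that follows the second-to-last '>' of the link
def pvHeadVisLen (s : String) : Int :=
  ((((s.toList.splitOn '>').reverse.tail.headD []).takeWhile (fun c => c ≠ '<')).length : Int)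

-- When the list is non-empty and the first link's visible text is longer than max_line_length,
-- A flushes its initial empty current line and returns '<br>' + B's value (a spurious leading
-- blank line); B starts each line with a link unconditionally, which is the intended wrapping.
def D_join_feature_links_with_linebreaks (feature_links : List String) (max_line_length : Int) : Prop :=
  feature_links ≠ [] ∧ max_line_length < pvHeadVisLen (feature_links.headD "")
instance (feature_links : List String) (max_line_length : Int) : Decidable (D_join_feature_links_with_linebreaks feature_links max_line_length) := by unfold D_join_feature_links_with_linebreaks; infer_instance

def Spec_join_feature_links_with_linebreaks (feature_links : List String) (max_line_length : Int) (out : String) : Prop := ¬ D_join_feature_links_with_linebreaks feature_links max_line_length → out = join_feature_links_with_linebreaks_alt feature_links max_line_length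
instance (feature_links : List String) (max_line_length : Int) (out : String) : Decidable (Spec_join_feature_links_with_linebreaks feature_links max_line_length out) := by unfold Spec_join_feature_links_with_linebreaks; infer_instance

def pvDiffWitness_join_feature_links_with_linebreaks : List String × Int :=
  (["<a>abcdef</a>"], 3)
def pvDiffWitnessOut_join_feature_links_with_linebreaks : String × String :=
  ("<br><a>abcdef</a>", "<a>abcdef</a>")

-- ===== CLAIM (what is proved, stated in full; the proofs are below) =====
def Claim_unchanged_join_feature_links_with_linebreaks : Prop := ∀ (feature_links : List String) (max_line_length : Int), Dom_join_feature_links_with_linebreaks feature_links max_line_length → Pre_join_feature_links_with_linebreaks feature_links max_line_length → Spec_join_feature_links_with_linebreaks feature_links max_line_length (join_feature_links_with_linebreaks feature_links max_line_length)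
def Claim_changed_join_feature_links_with_linebreaks : Prop := Dom_join_feature_links_with_linebreaks (pvDiffWitness_join_feature_links_with_linebreaks.1) (pvDiffWitness_join_feature_links_with_linebreaks.2) ∧ Pre_join_feature_links_with_linebreaks (pvDiffWitness_join_feature_links_with_linebreaks.1) (pvDiffWitness_join_feature_links_with_linebreaks.2) ∧ D_join_feature_links_with_linebreaks (pvDiffWitness_join_feature_links_with_linebreaks.1) (pvDiffWitness_join_feature_links_with_linebreaks.2) ∧ join_feature_links_with_linebreaks (pvDiffWitness_join_feature_links_with_linebreaks.1) (pvDiffWitness_join_feature_links_with_linebreaks.2) = pvDiffWitnessOut_join_feature_links_with_linebreaks.1 ∧ join_feature_links_with_linebreaks_alt (pvDiffWitness_join_feature_links_with_linebreaks.1) (pvDiffWitness_join_feature_links_with_linebreaks.2) = pvDiffWitnessOut_join_feature_links_with_linebreaks.2 ∧ pvDiffWitnessOut_join_feature_links_with_linebreaks.1 ≠ pvDiffWitnessOut_join_feature_links_with_linebreaks.2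
def Claim_exact_join_feature_links_with_linebreaks : Prop := ∀ (feature_links : List String) (max_line_length : Int), Dom_join_feature_links_with_linebreaks feature_links max_line_length → Pre_join_feature_links_with_linebreaks feature_links max_line_length → D_join_feature_links_with_linebreaks feature_links max_line_length → join_feature_links_with_linebreaks feature_links max_line_length ≠ join_feature_links_with_linebreaks_alt feature_links max_line_length

-- ===== LEMMAS AND PROOFS =====

theorem pvVisLen_eq (s : List Char) : pvVisLen s = ((pvVisA s).length : Int) := by
  unfold pvVisLen pvVisA
  cases PySem.List.pyGet? (PySem.Chars.splitOn s ['>']) (-2) with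
  | none => simp [PySem.Chars.len]
  | some t => simp [PySem.Chars.len]

theorem join2_ne_nil (g : List (List Char)) (hg : ∀ x ∈ g, x ≠ []) (hne : g ≠ []) :
    PySem.Chars.join [',', ' '] g ≠ [] := by
  match g with
  | [] => exact absurd rfl hne
  | [a] => simpa [PySem.Chars.join_singleton] using hg a (by simp)
  | a :: b :: r =>
    have ha := hg a (by simp)
    simp only [PySem.Chars.join_cons_cons]
    intro h
    rcases List.append_eq_nil_iff.mp h with ⟨h1, _⟩
    rcases List.append_eq_nil_iff.mp h1 with ⟨h2, _⟩
    exact ha h2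

theorem join2_append (g : List (List Char)) (l : List Char) (hne : g ≠ []) :
    PySem.Chars.join [',', ' '] (g ++ [l]) = PySem.Chars.join [',', ' '] g ++ [',', ' '] ++ l := by
  induction g with
  | nil => exact absurd rfl hne
  | cons a r ih =>
    cases r with
    | nil => simp [PySem.Chars.join_cons_cons, PySem.Chars.join_singleton]
    | cons b r' =>
      have ihh := ih (by simp)
      simp only [List.cons_append] at ihh ⊢
      simp only [PySem.Chars.join_cons_cons, ihh]
      simp [List.append_assoc]

theorem pvWrapLoop_append (fuel : Nat) (maxL : Int) (links acc1 acc2 : List (List Char)) :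
    pvWrapLoopF fuel maxL links (acc1 ++ acc2) = acc1 ++ pvWrapLoopF fuel maxL links acc2 := by
  induction fuel generalizing links acc2 with
  | zero => cases links <;> simp [pvWrapLoopF]
  | succ f ih =>
    cases links with
    | nil => simp [pvWrapLoopF]
    | cons l rest =>
      rw [pvWrapLoopF, pvWrapLoopF, List.append_assoc]
      exact ih _ _

-- A's loop with a non-empty current line equals: finish the current line with pvTakeRest, then pvWrapLoopF
theorem loop_eq (maxL : Int) (links : List (List Char)) (hlinks : ∀ l ∈ links, l ≠ [])
    (lines : List (List Char)) (g : List (List Char)) (cur : Int) (fuel : Nat)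
    (hg : ∀ x ∈ g, x ≠ []) (hne : g ≠ []) (hf : links.length ≤ fuel) :
    pvALoop maxL links lines (PySem.Chars.join [',', ' '] g) cur
      = pvWrapLoopF fuel maxL (pvTakeRest maxL cur links).2
          (lines ++ [PySem.Chars.join [',', ' '] (g ++ (pvTakeRest maxL cur links).1)]) := by
  induction links generalizing lines g cur fuel with
  | nil =>
    cases fuel <;>
      · simp only [pvALoop, pvTakeRest, pvWrapLoopF]
        rw [if_pos (join2_ne_nil g hg hne)]
        simp
  | cons l rest ih =>
    have hl : l ≠ [] := hlinks l (by simp)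
    have hrest : ∀ x ∈ rest, x ≠ [] := fun x hx => hlinks x (by simp [hx])
    have hjne : PySem.Chars.join [',', ' '] g ≠ [] := join2_ne_nil g hg hne
    obtain ⟨f, rfl⟩ : ∃ f, fuel = f + 1 := by
      cases fuel
      · simp at hf
      · exact ⟨_, rfl⟩
    simp only [pvALoop, pvTakeRest]
    rw [if_pos hjne, pvVisLen_eq]
    by_cases hfit : cur + 2 + ((pvVisA l).length : Int) ≤ maxL
    · rw [if_neg (by omega), if_pos hjne, if_pos hfit]
      rw [← join2_append g l hne]
      have heq : cur + (((pvVisA l).length : Int) + 2) = cur + 2 + ((pvVisA l).length : Int) := by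
        ring
      rw [heq]
      have := ih hrest lines (g ++ [l])
        (cur + 2 + ((pvVisA l).length : Int)) (f + 1)
        (by intro x hx
            rcases List.mem_append.mp hx with h | h
            · exact hg x h
            · simp at h; subst h; exact hl)
        (by simp)
        (by simp at hf ⊢; omega)
      rw [this]
      simp [List.append_assoc]
    · rw [if_pos (by omega), if_neg hfit]
      have h2 := ih hrest (lines ++ [PySem.Chars.join [',', ' '] g]) [l] (pvVisLen l) f
        (by intro x hx; simp at hx; subst hx; exact hl) (by simp)
        (by simpa using Nat.lt_succ_iff.mp (by simpa using hf))
      simp only [PySem.Chars.join_singleton] at h2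
      rw [pvVisLen_eq] at h2
      rw [h2]
      rw [pvWrapLoop_append f maxL _ (lines ++ [PySem.Chars.join [',', ' '] g]) _]
      simp only [List.append_nil, List.singleton_append]
      rw [pvWrapLoopF]
      rw [pvVisLen_eq, pvWrapLoop_append f maxL _ (lines ++ [PySem.Chars.join [',', ' '] g]) _]

theorem links_ne_nil (fl : List String)
    (hpre : ∀ s ∈ fl, PySem.Str.isIn ">" s = true) :
    ∀ l ∈ fl.map String.toList, l ≠ [] := by
  intro l hl
  rcases List.mem_map.mp hl with ⟨s, hs, rfl⟩
  have := hpre s hs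
  rw [PySem.Str.isIn_iff_infix] at this
  intro hnil
  rw [hnil] at this
  simpa using this.sublist.length_le

-- on a cons input, A's line list is B's with (only in the D_ case) a leading empty line
theorem top_cons (maxL : Int) (l : List Char) (rest : List (List Char))
    (hlinks : ∀ x ∈ (l :: rest), x ≠ []) :
    pvALoop maxL (l :: rest) [] [] 0
      = (if ((pvVisA l).length : Int) > maxL then [([] : List Char)] else [])
          ++ pvWrapLoopF (rest.length + 1) maxL (l :: rest) [] := by
  have hl : l ≠ [] := hlinks l (by simp)
  have hrest : ∀ x ∈ rest, x ≠ [] := fun x hx => hlinks x (by simp [hx])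
  have h2 := fun lines => loop_eq maxL rest hrest lines [l] (pvVisLen l) rest.length
    (by intro x hx; simp at hx; subst hx; exact hl) (by simp) (le_refl _)
  simp only [PySem.Chars.join_singleton] at h2
  rw [pvVisLen_eq] at h2
  simp only [pvALoop, ne_eq, not_true_eq_false, if_false, add_zero, zero_add,
    List.nil_append]
  by_cases hov : ((pvVisA l).length : Int) > maxL
  · rw [if_pos hov, if_pos hov, h2 [([] : List Char)]]
    rw [pvWrapLoop_append rest.length maxL _ [([] : List Char)] _]
    simp only [pvWrapLoopF, pvVisLen_eq, List.nil_append, List.singleton_append]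
  · rw [if_neg hov, if_neg hov, h2 ([] : List (List Char))]
    simp only [pvWrapLoopF, pvVisLen_eq, List.nil_append, List.singleton_append]

theorem pvWrapLoop_cons_ne_nil (n : Nat) (maxL : Int) (l : List Char) (rest : List (List Char)) :
    pvWrapLoopF (n + 1) maxL (l :: rest) [] ≠ [] := by
  rw [pvWrapLoopF]
  have h := pvWrapLoop_append n maxL (pvTakeRest maxL (pvVisLen l) rest).2
    [PySem.Chars.join [',', ' '] (l :: (pvTakeRest maxL (pvVisLen l) rest).1)] []
  simp only [List.append_nil] at h
  simp only [List.nil_append]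
  rw [h]
  simp

theorem modifyHead_id' {α : Type} (l : List α) : List.modifyHead (fun x => x) l = l := by
  cases l <;> simp

-- bridge: PySem's splitOn with a one-character separator is the standard library's List.splitOn
theorem go_eq (sc : Char) : ∀ (fuel : Nat) (l cur : List Char) (acc : List (List Char)),
    l.length < fuel →
    PySem.Chars.splitOn.go [sc] fuel l cur acc
      = acc.reverse ++ (l.splitOn sc).modifyHead (cur.reverse ++ ·) := by
  intro fuel
  induction fuel with
  | zero => intro l cur acc h; omega
  | succ f ih =>
    intro l cur acc h
    cases l with
    | nil => simp [PySem.Chars.splitOn.go, List.splitOn]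
    | cons c rest =>
      rw [PySem.Chars.splitOn.go]
      by_cases hc : sc = c
      · subst hc
        have hp : [sc].isPrefixOf (sc :: rest) = true := by simp
        rw [hp, if_pos rfl]
        rw [ih _ _ _ (by simpa using Nat.lt_of_succ_lt_succ h)]
        simp [List.splitOn, List.splitOnP_cons, modifyHead_id']
      · simp only [List.isPrefixOf]
        rw [if_neg (by simp [hc]), ih _ _ _ (by simpa using Nat.lt_of_succ_lt_succ h)]
        simp only [List.splitOn, List.splitOnP_cons, beq_iff_eq]
        rw [if_neg (fun hh => hc hh.symm)]
        rw [List.modifyHead_modifyHead]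
        have hf : (fun x => (c :: cur).reverse ++ x)
            = ((fun x => cur.reverse ++ x) ∘ List.cons c) := by
          funext x
          simp
        rw [hf]

theorem splitOn_bridge (cs : List Char) (sc : Char) :
    PySem.Chars.splitOn cs [sc] = cs.splitOn sc := by
  unfold PySem.Chars.splitOn
  rw [go_eq sc (cs.length + 1) cs [] [] (by omega)]
  simp [modifyHead_id']

theorem splitOn_headD (t : List Char) (sc : Char) :
    (t.splitOn sc).headD [] = t.takeWhile (fun c => c ≠ sc) := by
  induction t with
  | nil => simp [List.splitOn]
  | cons c rest ih =>
    by_cases hc : c = sc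
    · subst hc
      simp [List.splitOn, List.splitOnP_cons]
    · simp only [List.splitOn, List.splitOnP_cons, beq_iff_eq] at ih ⊢
      rw [if_neg hc, List.takeWhile_cons, if_pos (by simpa using hc)]
      obtain ⟨hh, ht, hE⟩ := List.exists_cons_of_ne_nil (List.splitOnP_ne_nil (fun x => x == sc) rest)
      rw [hE] at ih ⊢
      simpa using ih

theorem splitOn_length (t : List Char) (sc : Char) (h : sc ∈ t) :
    2 ≤ (t.splitOn sc).length := by
  induction t with
  | nil => simp at h
  | cons c rest ih =>
    by_cases hc : c = sc
    · subst hc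
      simp [List.splitOn, List.splitOnP_cons, List.splitOnP_ne_nil,
        Nat.succ_le_succ, Nat.one_le_iff_ne_zero]
    · have hmem : sc ∈ rest := by
        rcases List.mem_cons.mp h with h1 | h1
        · exact absurd h1.symm hc
        · exact h1
      have := ih hmem
      simp only [List.splitOn, List.splitOnP_cons, beq_iff_eq] at this ⊢
      rw [if_neg hc]
      simpa using this

-- a negative-index [-2] lookup is the second-to-last element
theorem pyGet_neg_two (xs : List (List Char)) (h : 2 ≤ xs.length) :
    PySem.List.pyGet? xs (-2) = some (xs.reverse.tail.headD []) := by
  have h1 : xs.reverse.tail.headD [] = (xs.reverse.tail.head?).getD [] := by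
    cases xs.reverse.tail <;> simp
  have h2 : xs.reverse.tail.head? = xs.reverse[1]? := by
    cases hx : xs.reverse with
    | nil => simp
    | cons a t => simp [List.head?_eq_getElem?]
  have h3 : xs.reverse[1]? = xs[xs.length - 2]? := by
    rw [List.getElem?_reverse (by omega)]
    congr 1
  have h4 : PySem.List.pyGet? xs (-2) = xs[xs.length - 2]? := by
    simp only [PySem.List.pyGet?, PySem.List.pyIdx?]
    split
    · omega
    · split
      · norm_num
        rfl
      · omega
  rw [h4, h1, h2, h3, List.getElem?_eq_getElem (by omega)]
  simp

-- under Pre_ (the link contains '>'), A's parsed visible text is the D_-side shape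
theorem pvVisA_eq_headVis (s : String) (h : PySem.Str.isIn ">" s = true) :
    pvVisA s.toList
      = ((s.toList.splitOn '>').reverse.tail.headD []).takeWhile (fun c => c ≠ '<') := by
  have hmem : '>' ∈ s.toList := by
    rw [PySem.Str.isIn_iff_infix] at h
    have := h.mem (a := '>') (by simp)
    exact this
  unfold pvVisA
  rw [splitOn_bridge, pyGet_neg_two _ (splitOn_length _ _ hmem)]
  show (PySem.Chars.splitOn ((s.toList.splitOn '>').reverse.tail.headD []) ['<']).headD [] = _
  rw [splitOn_bridge, splitOn_headD]

theorem pvHeadVisLen_eq (s : String) (h : PySem.Str.isIn ">" s = true) :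
    pvHeadVisLen s = ((pvVisA s.toList).length : Int) := by
  unfold pvHeadVisLen
  rw [pvVisA_eq_headVis s h]

-- ===== VERDICT (by name: the statement is the Claim_ definition above) =====
theorem join_feature_links_with_linebreaks_spec : Claim_unchanged_join_feature_links_with_linebreaks := by
  intro fl m _ hpre
  unfold Spec_join_feature_links_with_linebreaks
  intro hnd
  unfold join_feature_links_with_linebreaks join_feature_links_with_linebreaks_alt
  cases fl with
  | nil => simp [pvALoop, pvWrapLoopF]
  | cons s rest =>
    have hnd' : ¬ m < pvHeadVisLen s := by
      unfold D_join_feature_links_with_linebreaks at hnd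
      simpa using hnd
    rw [pvHeadVisLen_eq s (hpre s (by simp))] at hnd'
    simp only [List.map_cons, List.length_cons]
    rw [top_cons m s.toList (rest.map String.toList) (links_ne_nil (s :: rest) hpre)]
    rw [if_neg (by omega)]
    simp

theorem join_feature_links_with_linebreaks_changed : Claim_changed_join_feature_links_with_linebreaks := by
  unfold Claim_changed_join_feature_links_with_linebreaks; decide

theorem join_feature_links_with_linebreaks_tight : Claim_exact_join_feature_links_with_linebreaks := by
  intro fl m _ hpre hd
  cases fl with
  | nil => exact absurd hd (by unfold D_join_feature_links_with_linebreaks; simp)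
  | cons s rest =>
    have hd' : m < pvHeadVisLen s := by
      unfold D_join_feature_links_with_linebreaks at hd
      simpa using hd.2
    rw [pvHeadVisLen_eq s (hpre s (by simp))] at hd'
    unfold join_feature_links_with_linebreaks join_feature_links_with_linebreaks_alt
    simp only [List.map_cons, List.length_cons]
    rw [top_cons m s.toList (rest.map String.toList) (links_ne_nil (s :: rest) hpre)]
    rw [if_pos (by omega)]
    intro h
    obtain ⟨b, bs, hB⟩ := List.exists_cons_of_ne_nil
      (pvWrapLoop_cons_ne_nil (rest.map String.toList).length m s.toList (rest.map String.toList))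
    rw [List.length_map] at hB
    rw [hB] at h
    have hlists : PySem.Chars.join ['<', 'b', 'r', '>'] ([] :: b :: bs)
        = PySem.Chars.join ['<', 'b', 'r', '>'] (b :: bs) := by
      have := congrArg String.toList h
      simpa [List.length_map, hB] using this
    have hlen := congrArg List.length hlists
    rw [PySem.Chars.join_cons_cons] at hlen
    simp at hlen
    omega
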